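-- pv_equiv track=rewrite | github.com/RuanCampello/codeforces | atcoder/414/count-a-mod-b-equal-c.py | count_valid_tuples_simple
-- ===== SOURCE A (Python) =====
-- def count_valid_tuples_simple(N):
--     MOD = 998244353
--     ans = 0
--
--     for b in range(1, N + 1):
--         for c in range(1, b):
--             q = 1
--             while True:
--                 a = b * q + c
--                 if a > N:
--                     break
--                 if a != b and a != c:
--                     ans = (ans + 1) % MOD
--                 q += 1
--
--     return ans % MOD
-- ===== SOURCE B (Python) =====
-- def count_valid_tuples_simple(N):
--     # For q >= 1, 1 <= c < b we always have a = b*q + c > b > c, so the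
--     # a != b and a != c checks never exclude anything.  Fixing b and c,
--     # the number of valid q is floor((N-c)/b); summing that over c = 1..b-1
--     # (together with the c = 0 term floor(N/b)) telescopes to N - b + 1,
--     # hence the total count is N*(N+1)//2 - sum_{b=1..N} N//b.
--     MOD = 998244353
--     if N < 1:
--         return 0
--     harmonic = 0
--     for b in range(1, N + 1):
--         harmonic += N // b
--     return (N * (N + 1) // 2 - harmonic) % MOD
-- ===== Notes on version B (the rewrite author's own statement) =====
-- stated objective: faster
-- what changed: Replaces the triple loop over (b,c,q) by the closed form N*(N+1)//2 minus a single harmonic sum of N//b, using that a!=b and a!=c always hold and that the inner floor sums telescope.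
import Mathlib
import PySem

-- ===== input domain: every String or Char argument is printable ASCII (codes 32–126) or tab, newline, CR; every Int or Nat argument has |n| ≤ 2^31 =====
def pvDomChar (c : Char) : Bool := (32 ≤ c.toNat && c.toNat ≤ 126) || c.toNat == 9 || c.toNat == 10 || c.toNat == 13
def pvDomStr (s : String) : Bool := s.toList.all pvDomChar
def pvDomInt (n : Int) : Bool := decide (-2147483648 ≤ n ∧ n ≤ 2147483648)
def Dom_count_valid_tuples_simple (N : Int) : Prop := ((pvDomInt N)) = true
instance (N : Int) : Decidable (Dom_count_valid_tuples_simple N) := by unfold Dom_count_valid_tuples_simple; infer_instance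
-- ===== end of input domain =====

-- B replaces A's triple loop by the closed form N*(N+1)//2 minus one harmonic sum of N//b
-- (the a≠b, a≠c tests never fire and the inner floor sums telescope); return values proved equal below.

-- ===== PORT A =====
-- the body of A's 'while True' loop; fuel only makes it total (q grows each step, so N+1 steps suffice)
def pvInnerA (N b c : Int) : Nat → Int → Int → Int
  | 0, _, ans => ans
  | fuel+1, q, ans =>
    if b * q + c > N then ans
    else pvInnerA N b c fuel (q + 1)
      (if b * q + c ≠ b ∧ b * q + c ≠ c then PySem.Int.mod (ans + 1) 998244353 else ans)

def count_valid_tuples_simple (N : Int) : Int :=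
  let ans := (PySem.List.pyRange 1 (N + 1) 1).foldl (fun ans b =>
      (PySem.List.pyRange 1 b 1).foldl (fun ans c =>
        pvInnerA N b c (N.toNat + 1) 1 ans) ans) 0
  PySem.Int.mod ans 998244353

-- ===== PORT B =====
def count_valid_tuples_simple_alt (N : Int) : Int :=
  if N < 1 then 0
  else
    let harmonic := (PySem.List.pyRange 1 (N + 1) 1).foldl
      (fun acc b => acc + PySem.Int.floordiv N b) 0
    PySem.Int.mod (PySem.Int.floordiv (N * (N + 1)) 2 - harmonic) 998244353

-- ===== PRECONDITION & SPEC =====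
def Spec_count_valid_tuples_simple (N : Int) (out : Int) : Prop := out = count_valid_tuples_simple_alt N
instance (N : Int) (out : Int) : Decidable (Spec_count_valid_tuples_simple N out) := by unfold Spec_count_valid_tuples_simple; infer_instance

-- ===== CLAIM (what is proved, stated in full; the proofs are below) =====
def Claim_equal_count_valid_tuples_simple : Prop := ∀ (N : Int), Dom_count_valid_tuples_simple N → Spec_count_valid_tuples_simple N (count_valid_tuples_simple N)

-- ===== LEMMAS AND PROOFS =====

-- number of accepted iterations remaining in A's while loop when the counter is at q
def pvCnt (N b c q : Int) : Nat := (PySem.Int.floordiv (N - c) b - q + 1).toNat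

lemma pvInnerA_eq (N b c : Int) (hb : 1 ≤ b) (hc : 1 ≤ c) :
    ∀ (fuel : Nat) (q ans : Int), 1 ≤ q → 0 ≤ ans → ans < 998244353 →
    pvCnt N b c q ≤ fuel →
    pvInnerA N b c fuel q ans = PySem.Int.mod (ans + (pvCnt N b c q : Int)) 998244353 := by
  intro fuel
  induction fuel with
  | zero =>
    intro q ans hq h0 h1 hf
    have hcnt : pvCnt N b c q = 0 := Nat.le_zero.mp hf
    rw [pvInnerA, hcnt, PySem.Int.mod_eq_emod_of_pos (by norm_num)]
    simp [Int.emod_eq_of_lt h0 h1]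
  | succ fuel ih =>
    intro q ans hq h0 h1 hf
    rw [pvInnerA]
    by_cases hgt : b * q + c > N
    · rw [if_pos hgt]
      have hK : PySem.Int.floordiv (N - c) b < q := by
        rw [PySem.Int.floordiv_lt_iff_lt_mul (by omega)]
        have := mul_comm q b
        nlinarith
      have hcnt : pvCnt N b c q = 0 := by unfold pvCnt; omega
      rw [hcnt, PySem.Int.mod_eq_emod_of_pos (by norm_num)]
      simp [Int.emod_eq_of_lt h0 h1]
    · rw [if_neg hgt]
      have hle : b * q + c ≤ N := by omega
      have hqK : q ≤ PySem.Int.floordiv (N - c) b := by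
        rw [PySem.Int.le_floordiv_iff_mul_le (by omega)]
        have := mul_comm q b
        nlinarith
      have hbq : b ≤ b * q := le_mul_of_one_le_right (by omega) hq
      have hne : b * q + c ≠ b ∧ b * q + c ≠ c := by constructor <;> omega
      rw [if_pos hne]
      have h0' : 0 ≤ PySem.Int.mod (ans + 1) 998244353 := by
        rw [PySem.Int.mod_eq_emod_of_pos (by norm_num)]
        exact Int.emod_nonneg _ (by norm_num)
      have h1' : PySem.Int.mod (ans + 1) 998244353 < 998244353 := by
        rw [PySem.Int.mod_eq_emod_of_pos (by norm_num)]
        exact Int.emod_lt_of_pos _ (by norm_num)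
      have hcnt : pvCnt N b c q = pvCnt N b c (q + 1) + 1 := by unfold pvCnt; omega
      have hf' : pvCnt N b c (q + 1) ≤ fuel := by omega
      rw [ih (q + 1) _ (by omega) h0' h1' hf']
      simp only [PySem.Int.mod_eq_emod_of_pos (show (0:Int) < 998244353 by norm_num)]
      rw [hcnt]
      push_cast
      omega

lemma pvCnt_le (N b c : Int) (hb : 1 ≤ b) (hc : 1 ≤ c) : pvCnt N b c 1 ≤ N.toNat + 1 := by
  unfold pvCnt
  by_cases h : ((N.toNat : Int) + 1) ≤ PySem.Int.floordiv (N - c) b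
  · have h2 := (PySem.Int.le_floordiv_iff_mul_le (by omega)).mp h
    have h3 : ((N.toNat : Int) + 1) ≤ ((N.toNat : Int) + 1) * b :=
      le_mul_of_one_le_right (by positivity) hb
    omega
  · omega

-- per-b inner sum of A, as a natural number
def pvSB (N b : Int) : Nat := ((PySem.List.pyRange 1 b 1).map (fun c => pvCnt N b c 1)).sum

lemma pvFoldC (N b : Int) (hb : 1 ≤ b) :
    ∀ (L : List Int), (∀ c ∈ L, 1 ≤ c) → ∀ ans : Int, 0 ≤ ans → ans < 998244353 →
    L.foldl (fun ans c => pvInnerA N b c (N.toNat + 1) 1 ans) ans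
      = PySem.Int.mod (ans + ((L.map (fun c => pvCnt N b c 1)).sum : Nat)) 998244353 := by
  intro L
  induction L with
  | nil =>
    intro _ ans h0 h1
    simp only [List.foldl_nil, List.map_nil, List.sum_nil, Nat.cast_zero, add_zero]
    rw [PySem.Int.mod_eq_emod_of_pos (by norm_num)]
    exact (Int.emod_eq_of_lt h0 h1).symm
  | cons c L ih =>
    intro hmem ans h0 h1
    have hc : 1 ≤ c := hmem c (by simp)
    rw [List.foldl_cons,
      pvInnerA_eq N b c hb hc _ 1 ans (by norm_num) h0 h1 (pvCnt_le N b c hb hc)]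
    have h0' : 0 ≤ PySem.Int.mod (ans + (pvCnt N b c 1 : Int)) 998244353 := by
      rw [PySem.Int.mod_eq_emod_of_pos (by norm_num)]
      exact Int.emod_nonneg _ (by norm_num)
    have h1' : PySem.Int.mod (ans + (pvCnt N b c 1 : Int)) 998244353 < 998244353 := by
      rw [PySem.Int.mod_eq_emod_of_pos (by norm_num)]
      exact Int.emod_lt_of_pos _ (by norm_num)
    rw [ih (fun x hx => hmem x (by simp [hx])) _ h0' h1']
    simp only [PySem.Int.mod_eq_emod_of_pos (show (0:Int) < 998244353 by norm_num),
      List.map_cons, List.sum_cons]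
    push_cast
    omega

lemma pvFoldB (N : Int) :
    ∀ (L : List Int), (∀ b ∈ L, 1 ≤ b) → ∀ ans : Int, 0 ≤ ans → ans < 998244353 →
    L.foldl (fun ans b =>
        (PySem.List.pyRange 1 b 1).foldl (fun ans c =>
          pvInnerA N b c (N.toNat + 1) 1 ans) ans) ans
      = PySem.Int.mod (ans + ((L.map (fun b => pvSB N b)).sum : Nat)) 998244353 := by
  intro L
  induction L with
  | nil =>
    intro _ ans h0 h1
    simp only [List.foldl_nil, List.map_nil, List.sum_nil, Nat.cast_zero, add_zero]
    rw [PySem.Int.mod_eq_emod_of_pos (by norm_num)]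
    exact (Int.emod_eq_of_lt h0 h1).symm
  | cons b L ih =>
    intro hmem ans h0 h1
    have hb : 1 ≤ b := hmem b (by simp)
    have hcm : ∀ c ∈ PySem.List.pyRange 1 b 1, 1 ≤ c :=
      fun c hcm => (PySem.List.mem_pyRange_one.mp hcm).1
    rw [List.foldl_cons, pvFoldC N b hb _ hcm ans h0 h1]
    have hdef : (List.map (fun c => pvCnt N b c 1) (PySem.List.pyRange 1 b 1)).sum = pvSB N b := rfl
    rw [hdef]
    have h0' : 0 ≤ PySem.Int.mod (ans + (pvSB N b : Int)) 998244353 := by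
      rw [PySem.Int.mod_eq_emod_of_pos (by norm_num)]
      exact Int.emod_nonneg _ (by norm_num)
    have h1' : PySem.Int.mod (ans + (pvSB N b : Int)) 998244353 < 998244353 := by
      rw [PySem.Int.mod_eq_emod_of_pos (by norm_num)]
      exact Int.emod_lt_of_pos _ (by norm_num)
    rw [ih (fun x hx => hmem x (by simp [hx])) _ h0' h1']
    simp only [PySem.Int.mod_eq_emod_of_pos (show (0:Int) < 998244353 by norm_num),
      List.map_cons, List.sum_cons]
    push_cast
    omega

-- ===== the pure arithmetic identity =====

lemma pvCore (b' : Nat) : ∀ d : Nat,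
    (∑ c ∈ Finset.range (b' + 1), (b' + 1 + d - c) / (b' + 1)) = d + 1 := by
  intro d
  induction d with
  | zero =>
    rw [Finset.sum_range_succ']
    have h1 : ∀ i ∈ Finset.range b', (b' + 1 + 0 - (i + 1)) / (b' + 1) = 0 := by
      intro i hi
      exact Nat.div_eq_of_lt (by have := Finset.mem_range.mp hi; omega)
    rw [Finset.sum_congr rfl h1]
    simp
  | succ d ih =>
    rw [Finset.sum_range_succ']
    rw [Finset.sum_range_succ] at ih
    have hshift : ∀ i ∈ Finset.range b',
        (b' + 1 + (d + 1) - (i + 1)) / (b' + 1) = (b' + 1 + d - i) / (b' + 1) := by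
      intro i hi; congr 1; omega
    rw [Finset.sum_congr rfl hshift]
    have hlast : (b' + 1 + d - b') / (b' + 1) = (d + 1) / (b' + 1) := by congr 1; omega
    rw [hlast] at ih
    have htop : (b' + 1 + (d + 1) - 0) / (b' + 1) = (d + 1) / (b' + 1) + 1 := by
      have e : b' + 1 + (d + 1) - 0 = (d + 1) + (b' + 1) := by omega
      rw [e, Nat.add_div_right _ (by omega)]
    rw [htop]
    have hle : (d + 1) / (b' + 1) ≤ d + 1 := Nat.div_le_self _ _
    omega

lemma pvPerB (n i : Nat) (h : i < n) :
    (∑ j ∈ Finset.range i, (n - (1 + j)) / (1 + i)) + n / (1 + i) = n - i := by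
  obtain ⟨d, rfl⟩ : ∃ d, n = i + 1 + d := ⟨n - (i + 1), by omega⟩
  have hc := pvCore i d
  rw [Finset.sum_range_succ'] at hc
  have h1 : ∀ j ∈ Finset.range i,
      (i + 1 + d - (j + 1)) / (i + 1) = (i + 1 + d - (1 + j)) / (1 + i) := by
    intro j hj
    have e1 : i + 1 + d - (j + 1) = i + 1 + d - (1 + j) := by omega
    rw [e1, Nat.add_comm 1 i]
  rw [Finset.sum_congr rfl h1] at hc
  have h2 : (i + 1 + d - 0) / (i + 1) = (i + 1 + d) / (1 + i) := by
    rw [Nat.sub_zero, Nat.add_comm 1 i]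
  rw [h2] at hc
  omega

lemma pvGauss (n : Nat) : (∑ i ∈ Finset.range n, (n - i)) = n * (n + 1) / 2 := by
  have h := Finset.sum_range_reflect (fun j => j + 1) n
  have h1 : ∀ j ∈ Finset.range n, (n - 1 - j + 1) = n - j := by
    intro j hj
    have := Finset.mem_range.mp hj
    omega
  simp only [] at h
  rw [Finset.sum_congr rfl h1] at h
  have h' : (∑ i ∈ Finset.range n, (n - i)) = ∑ j ∈ Finset.range n, (j + 1) := h
  rw [h']
  have h2 := Finset.sum_range_succ' (fun i => i) n
  have h3 : (∑ j ∈ Finset.range (n + 1), j) = (n + 1) * n / 2 := by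
    rw [Finset.sum_range_id]
    simp
  rw [Nat.mul_comm n (n + 1)]
  omega

lemma pvKey (n : Nat) :
    (∑ i ∈ Finset.range n, ∑ j ∈ Finset.range i, (n - (1 + j)) / (1 + i))
      + (∑ i ∈ Finset.range n, n / (1 + i)) = n * (n + 1) / 2 := by
  rw [← Finset.sum_add_distrib]
  have h1 : ∀ i ∈ Finset.range n,
      (∑ j ∈ Finset.range i, (n - (1 + j)) / (1 + i)) + n / (1 + i) = n - i :=
    fun i hi => pvPerB n i (Finset.mem_range.mp hi)
  rw [Finset.sum_congr rfl h1, pvGauss]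

-- ===== bridges between list sums over pyRange and Finset sums =====

lemma pvListSumNat (g : Nat → Nat) : ∀ n : Nat,
    ((List.range n).map g).sum = ∑ i ∈ Finset.range n, g i := by
  intro n
  induction n with
  | zero => simp
  | succ m ih => simp [List.range_succ, Finset.sum_range_succ, ih]

lemma pvListSumInt (g : Nat → Int) : ∀ n : Nat,
    ((List.range n).map g).sum = ∑ i ∈ Finset.range n, g i := by
  intro n
  induction n with
  | zero => simp
  | succ m ih => simp [List.range_succ, Finset.sum_range_succ, ih]

lemma pvCnt_eq (n k i : Nat) (hk : 1 + k ≤ n) :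
    pvCnt (n : Int) ((1 + i : Nat) : Int) ((1 + k : Nat) : Int) 1 = (n - (1 + k)) / (1 + i) := by
  unfold pvCnt
  have e1 : (n : Int) - ((1 + k : Nat) : Int) = ((n - (1 + k) : Nat) : Int) := by
    push_cast
    omega
  rw [e1, PySem.Int.floordiv_natCast, sub_add_cancel, Int.toNat_natCast]

lemma pvSB_eq (n i : Nat) (hi : i < n) :
    pvSB (n : Int) ((1 + i : Nat) : Int) = ∑ j ∈ Finset.range i, (n - (1 + j)) / (1 + i) := by
  unfold pvSB
  rw [PySem.List.pyRange_one]
  have hlen : ((((1 + i : Nat) : Int) - 1).toNat) = i := by omega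
  rw [hlen, List.map_map, pvListSumNat]
  apply Finset.sum_congr rfl
  intro k hk
  have hkn : k < i := Finset.mem_range.mp hk
  simp only [Function.comp]
  have e : (1 : Int) + (k : Int) = ((1 + k : Nat) : Int) := by push_cast; ring
  rw [e, pvCnt_eq n k i (by omega)]

-- ===== VERDICT (by name: the statement is the Claim_ definition above) =====
theorem count_valid_tuples_simple_spec : Claim_equal_count_valid_tuples_simple := by
  intro N _
  unfold Spec_count_valid_tuples_simple count_valid_tuples_simple count_valid_tuples_simple_alt
  by_cases hN : N < 1
  · rw [if_pos hN]
    rw [PySem.List.pyRange_one_eq_nil (by omega)]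
    simp only [List.foldl_nil]
    rw [PySem.Int.mod_eq_emod_of_pos (by norm_num)]
    simp
  · rw [if_neg hN]
    have h1N : 1 ≤ N := by omega
    set n := N.toNat with hn
    have hNn : N = (n : Int) := by omega
    have hmemB : ∀ b ∈ PySem.List.pyRange 1 (N + 1) 1, 1 ≤ b :=
      fun b hb => (PySem.List.mem_pyRange_one.mp hb).1
    rw [pvFoldB N _ hmemB 0 (by norm_num) (by norm_num)]
    rw [PySem.List.foldl_add]
    have hlen : (N + 1 - 1).toNat = n := by omega
    have hTot : ((PySem.List.pyRange 1 (N + 1) 1).map (fun b => pvSB N b)).sum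
        = ∑ i ∈ Finset.range n, ∑ j ∈ Finset.range i, (n - (1 + j)) / (1 + i) := by
      rw [PySem.List.pyRange_one, hlen, List.map_map, pvListSumNat]
      apply Finset.sum_congr rfl
      intro k hk
      have hkn : k < n := Finset.mem_range.mp hk
      simp only [Function.comp]
      have e : (1 : Int) + (k : Int) = ((1 + k : Nat) : Int) := by push_cast; ring
      rw [hNn, e, pvSB_eq n k hkn]
    have hH : ((PySem.List.pyRange 1 (N + 1) 1).map (fun b => PySem.Int.floordiv N b)).sum
        = ((∑ i ∈ Finset.range n, n / (1 + i) : Nat) : Int) := by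
      rw [PySem.List.pyRange_one, hlen, List.map_map, pvListSumInt, Nat.cast_sum]
      apply Finset.sum_congr rfl
      intro k hk
      simp only [Function.comp]
      have e : (1 : Int) + (k : Int) = ((1 + k : Nat) : Int) := by push_cast; ring
      rw [hNn, e, PySem.Int.floordiv_natCast]
    have hT : PySem.Int.floordiv (N * (N + 1)) 2 = ((n * (n + 1) / 2 : Nat) : Int) := by
      have e : N * (N + 1) = ((n * (n + 1) : Nat) : Int) := by rw [hNn]; push_cast; ring
      rw [e]
      exact_mod_cast PySem.Int.floordiv_natCast (n * (n + 1)) 2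
    rw [hTot, hH, hT]
    have hkey := pvKey n
    simp only [PySem.Int.mod_eq_emod_of_pos (show (0:Int) < 998244353 by norm_num)]
    omega
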